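-- pv_equiv track=rewrite | github.com/katsanyi/aoc2023 | aoc14.py | process0
-- ===== SOURCE A (Python) =====
-- def process0(ret):
--     width = len(ret[0])
--     depth = len(ret)
--     #ret = [[0] * width for i in range(depth)]
--
--     changed = True
--     while changed:
--         changed = False
--         for i in range(width):
--             for j in range(1,depth):
--                 if ret[j][i] == 1 and ret[j - 1][i] == 0:
--                     ret[j - 1][i] = 1
--                     ret[j][i] = 0
--                     changed = True
-- #    print_world(ret)
--     return ret
-- ===== SOURCE B (Python) =====
-- def process0(ret):
--     width = len(ret[0])
--     depth = len(ret)
--     for i in range(width):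
--         col = [ret[j][i] for j in range(depth)]
--         out = []
--         zeros = 0
--         for v in col:
--             if v == 1:
--                 out.append(1)
--             elif v == 0:
--                 zeros += 1
--             else:
--                 out.extend([0] * zeros)
--                 out.append(v)
--                 zeros = 0
--         out.extend([0] * zeros)
--         for j in range(depth):
--             ret[j][i] = out[j]
--     return ret
-- ===== Notes on version B (the rewrite author's own statement) =====
-- stated objective: alternative
-- what changed: A repeatedly sweeps the whole grid, bubbling each rock up one cell per sweep until a fixpoint is reached; B removes the while loop entirely and instead reads each column once, packing the rocks directly below the last blocker with a pending-zeros counter, then writes the column back.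
import Mathlib
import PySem

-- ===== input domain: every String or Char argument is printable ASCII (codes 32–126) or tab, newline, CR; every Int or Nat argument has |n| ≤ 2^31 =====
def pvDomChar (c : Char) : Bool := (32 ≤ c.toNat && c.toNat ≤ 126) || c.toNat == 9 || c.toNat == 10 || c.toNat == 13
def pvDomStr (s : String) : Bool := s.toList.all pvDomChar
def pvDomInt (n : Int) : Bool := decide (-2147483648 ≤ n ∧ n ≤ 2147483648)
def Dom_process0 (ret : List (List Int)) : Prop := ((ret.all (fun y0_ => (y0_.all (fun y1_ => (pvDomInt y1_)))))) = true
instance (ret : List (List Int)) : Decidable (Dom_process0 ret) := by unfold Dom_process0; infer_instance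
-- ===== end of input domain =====

-- B replaces A's bubble-to-fixpoint sweeps by a single settling pass per column (one read, one write);
-- both A and B mutate `ret` in place in Python and leave it in the same final state — the theorems are about the return value.

-- ===== PORT A =====
-- ret[j][i] read: in range on every input admitted by Pre_process0 (getD default never used there)
def pvEntry (g : List (List Int)) (j i : Nat) : Int := (g.getD j []).getD i 0

-- ret[j][i] = v
def pvSetCell (g : List (List Int)) (j i : Nat) (v : Int) : List (List Int) :=
  g.set j ((g.getD j []).set i v)

-- body of A's inner `for j in range(1, depth)` loop
def pvStepA (i : Nat) (st : List (List Int) × Bool) (j : Nat) : List (List Int) × Bool :=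
  if pvEntry st.1 j i = 1 ∧ pvEntry st.1 (j - 1) i = 0 then
    (pvSetCell (pvSetCell st.1 (j - 1) i 1) j i 0, true)
  else st

-- one iteration of A's `while changed` loop (changed = False; the two nested for loops)
def pvPassA (width depth : Nat) (g : List (List Int)) : List (List Int) × Bool :=
  (List.range width).foldl
    (fun st i => (List.range' 1 (depth - 1)).foldl (pvStepA i) st) (g, false)

-- termination measure for A's while loop: Σ j * (number of 1s in row j)
def pvPot : List (List Int) → Nat → Nat
  | [], _ => 0
  | r :: t, k => k * r.count 1 + pvPot t (k + 1)

-- the `while changed:` loop of A. The fuel argument only makes the recursion structural: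
-- pvPot strictly decreases on every changed pass (proved in pvPassA_pot below), so fuel
-- pvPot g 0 + 1 is never exhausted and the loop runs exactly as Python's `while changed`.
def pvLoopA : Nat → Nat → Nat → List (List Int) → List (List Int)
  | 0, _, _, g => g
  | fuel + 1, width, depth, g =>
    if (pvPassA width depth g).2 = true then pvLoopA fuel width depth (pvPassA width depth g).1
    else (pvPassA width depth g).1

def process0 (ret : List (List Int)) : List (List Int) :=
  pvLoopA (pvPot ret 0 + 1) (ret.headD []).length ret.length ret

-- ===== PORT B =====
-- col = [ret[j][i] for j in range(depth)]
def pvReadCol (g : List (List Int)) (i depth : Nat) : List Int :=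
  (List.range depth).map (fun j => pvEntry g j i)

-- body of B's `for v in col` loop: state = (out, zeros)
def pvSettleStep (st : List Int × Nat) (v : Int) : List Int × Nat :=
  if v = 1 then (st.1 ++ [1], st.2)
  else if v = 0 then (st.1, st.2 + 1)
  else (st.1 ++ List.replicate st.2 0 ++ [v], 0)

-- build `out` then the trailing `out.extend([0] * zeros)`
def pvSettleCol (col : List Int) : List Int :=
  let p := col.foldl pvSettleStep ([], 0)
  p.1 ++ List.replicate p.2 0

-- for j in range(depth): ret[j][i] = out[j]   (out[j] in range whenever Pre_process0 holds)
def pvWriteCol (g : List (List Int)) (i : Nat) (c : List Int) (depth : Nat) : List (List Int) :=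
  (List.range depth).foldl (fun h j => pvSetCell h j i (c.getD j 0)) g

-- body of B's `for i in range(width)` loop
def pvColMap (depth : Nat) (g : List (List Int)) (i : Nat) : List (List Int) :=
  pvWriteCol g i (pvSettleCol (pvReadCol g i depth)) depth

def process0_alt (ret : List (List Int)) : List (List Int) :=
  (List.range (ret.headD []).length).foldl (pvColMap ret.length) ret

-- ===== PRECONDITION & SPEC =====
-- Pre_ excludes exactly the inputs where A raises IndexError: the empty grid (`ret[0]`)
-- and ragged grids with some row shorter than the first row (`ret[j][i]` with i < len(ret[0])).
def Pre_process0 (ret : List (List Int)) : Prop :=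
  ret ≠ [] ∧ ∀ r ∈ ret, (ret.headD []).length ≤ r.length
instance (ret : List (List Int)) : Decidable (Pre_process0 ret) := by unfold Pre_process0; infer_instance

def pvWitness_process0 : List (List Int) := [[0, 2], [1, 0], [1, 1]]

def Spec_process0 (ret : List (List Int)) (out : List (List Int)) : Prop := out = process0_alt ret
instance (ret : List (List Int)) (out : List (List Int)) : Decidable (Spec_process0 ret out) := by unfold Spec_process0; infer_instance

-- ===== CLAIM (what is proved, stated in full; the proofs are below) =====
def Claim_equal_process0 : Prop := ∀ (ret : List (List Int)), Dom_process0 ret → Pre_process0 ret → Spec_process0 ret (process0 ret)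

-- ===== LEMMAS AND PROOFS =====

theorem pvPot_set (g : List (List Int)) (r' : List Int) (j k : Nat) (h : j < g.length) :
    pvPot (g.set j r') k + (k + j) * ((g.getD j []).count 1)
      = pvPot g k + (k + j) * (r'.count 1) := by
  induction g generalizing j k with
  | nil => simp at h
  | cons r t ih =>
    cases j with
    | zero => simp [pvPot]; ring
    | succ j' =>
      have hlt : j' < t.length := by simpa using h
      have hih := ih j' (k + 1) hlt
      have hset : (r :: t).set (j' + 1) r' = r :: t.set j' r' := by simp
      rw [hset]
      simp only [pvPot, List.getD_cons_succ]
      have : k + 1 + j' = k + (j' + 1) := by omega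
      rw [this] at hih
      omega

theorem pvEntry_shape {g : List (List Int)} {j i : Nat} (h : pvEntry g j i ≠ 0) :
    j < g.length ∧ i < (g.getD j []).length := by
  by_cases hj : j < g.length
  · refine ⟨hj, ?_⟩
    by_cases hi : i < (g.getD j []).length
    · exact hi
    · exfalso
      apply h
      unfold pvEntry
      exact List.getD_eq_default _ _ (by omega)
  · exfalso
    apply h
    unfold pvEntry
    rw [show g.getD j ([] : List Int) = [] from List.getD_eq_default _ _ (by omega)]
    simp

theorem pvCount_set_zero {r : List Int} {i : Nat} (hi : i < r.length) (h1 : r.getD i 0 = 1) :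
    (r.set i 0).count 1 + 1 = r.count 1 := by
  have hc := List.count_set (a := (0 : Int)) (b := (1 : Int)) (l := r) (i := i) hi
  rw [List.getD_eq_getElem _ _ hi] at h1
  have hpos : 0 < r.count 1 := List.count_pos_iff.mpr (h1 ▸ List.getElem_mem hi)
  simp [h1] at hc
  omega

theorem pvCount_set_one (r : List Int) (i : Nat) :
    (r.set i 1).count 1 ≤ r.count 1 + 1 := by
  by_cases hi : i < r.length
  · have hc := List.count_set (a := (1 : Int)) (b := (1 : Int)) (l := r) (i := i) hi
    simp at hc
    omega
  · rw [List.set_eq_of_length_le (by omega)]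
    omega

theorem pvGetD_set_ne {α : Type} {l : List α} {n m : Nat} {a d : α} (h : m ≠ n) :
    (l.set n a).getD m d = l.getD m d := by
  simp [List.getD_eq_getElem?_getD, List.getElem?_set, Ne.symm h]

theorem pvGetD_set_self {α : Type} {l : List α} {n : Nat} {a d : α} (h : n < l.length) :
    (l.set n a).getD n d = a := by
  simp [List.getD_eq_getElem?_getD, List.getElem?_set, h]

theorem pvStepA_pot (i j : Nat) (st : List (List Int) × Bool) (hj : 1 ≤ j) :
    pvPot (pvStepA i st j).1 0 ≤ pvPot st.1 0 ∧
      ((pvStepA i st j).2 = true → st.2 = true ∨ pvPot (pvStepA i st j).1 0 < pvPot st.1 0) := by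
  unfold pvStepA
  split_ifs with hc
  · obtain ⟨h1, h0⟩ := hc
    obtain ⟨hjlen, hilen⟩ := pvEntry_shape (g := st.1) (j := j) (i := i) (by rw [h1]; norm_num)
    have hlt : pvPot (pvSetCell (pvSetCell st.1 (j - 1) i 1) j i 0) 0 < pvPot st.1 0 := by
      set g := st.1 with hg
      set r₁ := g.getD (j - 1) [] with hr1
      set r₂ := g.getD j [] with hr2
      have hj1len : j - 1 < g.length := by omega
      have hrow2 : (pvSetCell g (j - 1) i 1).getD j [] = r₂ :=
        pvGetD_set_ne (by omega)
      have hcell : pvSetCell (pvSetCell g (j - 1) i 1) j i 0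
          = (g.set (j - 1) (r₁.set i 1)).set j (r₂.set i 0) := by
        simp only [pvSetCell] at hrow2 ⊢
        rw [hrow2]
      have e1 := pvPot_set g (r₁.set i 1) (j - 1) 0 hj1len
      rw [← hr1] at e1
      have e2 := pvPot_set (g.set (j - 1) (r₁.set i 1)) (r₂.set i 0) j 0
        (by simpa using hjlen)
      have hrow2' : (g.set (j - 1) (r₁.set i 1)).getD j [] = r₂ := pvGetD_set_ne (by omega)
      rw [hrow2'] at e2
      have hc1 : (r₂.set i 0).count 1 + 1 = r₂.count 1 :=
        pvCount_set_zero hilen h1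
      have hc2 : (r₁.set i 1).count 1 ≤ r₁.count 1 + 1 := pvCount_set_one _ _
      simp only [Nat.zero_add] at e1 e2
      have m1 : (j - 1) * ((r₁.set i 1).count 1)
          ≤ (j - 1) * (r₁.count 1) + (j - 1) := by
        calc (j - 1) * ((r₁.set i 1).count 1)
            ≤ (j - 1) * (r₁.count 1 + 1) := Nat.mul_le_mul_left _ hc2
          _ = (j - 1) * (r₁.count 1) + (j - 1) := by ring
      have m2 : j * ((r₂.set i 0).count 1) + j = j * (r₂.count 1) := by
        rw [← hc1]; ring
      rw [hcell]
      omega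
    exact ⟨le_of_lt hlt, fun _ => Or.inr hlt⟩
  · exact ⟨le_refl _, fun h => Or.inl h⟩

theorem pvFold_pot {L : List Nat} {f : (List (List Int) × Bool) → Nat → (List (List Int) × Bool)}
    (hf : ∀ st x, x ∈ L → pvPot (f st x).1 0 ≤ pvPot st.1 0 ∧
      ((f st x).2 = true → st.2 = true ∨ pvPot (f st x).1 0 < pvPot st.1 0)) :
    ∀ st, pvPot (L.foldl f st).1 0 ≤ pvPot st.1 0 ∧
      ((L.foldl f st).2 = true → st.2 = true ∨ pvPot (L.foldl f st).1 0 < pvPot st.1 0) := by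
  induction L with
  | nil => intro st; exact ⟨le_refl _, fun h => Or.inl h⟩
  | cons x T ih =>
    intro st
    have hx := hf st x (List.mem_cons_self)
    have ht := ih (fun st y hy => hf st y (List.mem_cons_of_mem _ hy)) (f st x)
    refine ⟨le_trans ht.1 hx.1, fun h => ?_⟩
    rcases ht.2 h with h2 | h2
    · rcases hx.2 h2 with h3 | h3
      · exact Or.inl h3
      · exact Or.inr (lt_of_le_of_lt ht.1 h3)
    · exact Or.inr (lt_of_lt_of_le h2 hx.1)

theorem pvPassA_pot (w d : Nat) (g : List (List Int)) (h : (pvPassA w d g).2 = true) :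
    pvPot (pvPassA w d g).1 0 < pvPot g 0 := by
  have := pvFold_pot (L := List.range w)
    (f := fun st i => (List.range' 1 (d - 1)).foldl (pvStepA i) st)
    (fun st i _ => pvFold_pot (L := List.range' 1 (d - 1)) (f := pvStepA i)
      (fun st' j hj => pvStepA_pot i j st' (List.mem_range'_1.mp hj).1) st)
    (g, false)
  rcases this.2 h with h2 | h2
  · simp at h2
  · exact h2

-- shape preservation
theorem pvSetCell_length (g : List (List Int)) (j i : Nat) (v : Int) :
    (pvSetCell g j i v).length = g.length := by simp [pvSetCell]

theorem pvSetCell_rowlen (g : List (List Int)) (j i : Nat) (v : Int) (j' : Nat) :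
    ((pvSetCell g j i v).getD j' []).length = (g.getD j' []).length := by
  by_cases h : j' = j
  · subst h
    by_cases hj : j' < g.length
    · rw [pvSetCell, pvGetD_set_self hj]; simp
    · rw [pvSetCell, List.set_eq_of_length_le (by omega)]
  · rw [pvSetCell, pvGetD_set_ne h]

theorem pvEntry_setCell (g : List (List Int)) (j i : Nat) (v : Int) (j' i' : Nat) :
    pvEntry (pvSetCell g j i v) j' i' =
      if j' = j ∧ i' = i ∧ j < g.length ∧ i < (g.getD j []).length then v
      else pvEntry g j' i' := by
  split_ifs with h
  · obtain ⟨hj', hi', hj, hi⟩ := h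
    subst hj'; subst hi'
    rw [pvEntry, pvSetCell, pvGetD_set_self hj, pvGetD_set_self hi]
  · push_neg at h
    by_cases hj' : j' = j
    · subst hj'
      by_cases hj : j' < g.length
      · by_cases hi' : i' = i
        · subst hi'
          have hile : (g.getD j' []).length ≤ i' := h rfl rfl hj
          rw [pvEntry, pvSetCell, pvGetD_set_self hj,
            List.set_eq_of_length_le hile, pvEntry]
        · rw [pvEntry, pvSetCell, pvGetD_set_self hj, pvGetD_set_ne hi', pvEntry]
      · rw [pvEntry, pvSetCell, List.set_eq_of_length_le (by omega), pvEntry]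
    · rw [pvEntry, pvSetCell, pvGetD_set_ne hj', pvEntry]

theorem pvGrid_eq {g g' : List (List Int)} (h1 : g.length = g'.length)
    (h2 : ∀ j, (g.getD j []).length = (g'.getD j []).length)
    (h3 : ∀ j i, pvEntry g j i = pvEntry g' j i) : g = g' := by
  apply List.ext_getElem h1
  intro j hj hj'
  apply List.ext_getElem
  · have := h2 j
    rwa [List.getD_eq_getElem _ _ hj, List.getD_eq_getElem _ _ hj'] at this
  · intro i hi hi'
    have := h3 j i
    rw [pvEntry, pvEntry, List.getD_eq_getElem _ _ hj, List.getD_eq_getElem _ _ hj',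
      List.getD_eq_getElem _ _ hi, List.getD_eq_getElem _ _ hi'] at this
    exact this

theorem pvSetCell_comm {g : List (List Int)} {j i j' i' : Nat} {v w : Int} (h : i ≠ i') :
    pvSetCell (pvSetCell g j i v) j' i' w = pvSetCell (pvSetCell g j' i' w) j i v := by
  apply pvGrid_eq
  · simp [pvSetCell_length]
  · intro j''; simp only [pvSetCell_rowlen]
  · intro j'' i''
    simp only [pvEntry_setCell, pvSetCell_length, pvSetCell_rowlen]
    split_ifs <;> first | rfl | omega

-- writeCol
theorem pvWriteCol_zero (g : List (List Int)) (i : Nat) (c : List Int) :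
    pvWriteCol g i c 0 = g := by simp [pvWriteCol]

theorem pvWriteCol_succ (g : List (List Int)) (i : Nat) (c : List Int) (D : Nat) :
    pvWriteCol g i c (D + 1) = pvSetCell (pvWriteCol g i c D) D i (c.getD D 0) := by
  simp [pvWriteCol, List.range_succ]

theorem pvWriteCol_length (g : List (List Int)) (i : Nat) (c : List Int) (D : Nat) :
    (pvWriteCol g i c D).length = g.length := by
  induction D with
  | zero => rw [pvWriteCol_zero]
  | succ D ih => rw [pvWriteCol_succ, pvSetCell_length, ih]

theorem pvWriteCol_rowlen (g : List (List Int)) (i : Nat) (c : List Int) (D j' : Nat) :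
    ((pvWriteCol g i c D).getD j' []).length = (g.getD j' []).length := by
  induction D with
  | zero => rw [pvWriteCol_zero]
  | succ D ih => rw [pvWriteCol_succ, pvSetCell_rowlen, ih]

theorem pvEntry_writeCol (g : List (List Int)) (i : Nat) (c : List Int) (D j i' : Nat) :
    pvEntry (pvWriteCol g i c D) j i' =
      if i' = i ∧ j < D ∧ j < g.length ∧ i < (g.getD j []).length then c.getD j 0
      else pvEntry g j i' := by
  induction D with
  | zero => rw [pvWriteCol_zero]; split_ifs with h <;> first | omega | rfl
  | succ D ih =>
    rw [pvWriteCol_succ, pvEntry_setCell, pvWriteCol_length, pvWriteCol_rowlen, ih]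
    by_cases hjD : j = D
    · subst hjD
      split_ifs <;> first | rfl | omega
    · split_ifs <;> first | rfl | omega

-- readCol
theorem pvReadCol_length (g : List (List Int)) (i D : Nat) :
    (pvReadCol g i D).length = D := by simp [pvReadCol]

theorem pvReadCol_getD {g : List (List Int)} {i D j : Nat} (hj : j < D) :
    (pvReadCol g i D).getD j 0 = pvEntry g j i := by
  simp [pvReadCol, List.getD_eq_getElem?_getD, List.getElem?_map, List.getElem?_range, hj]

theorem pvReadCol_congr {g g' : List (List Int)} {i D : Nat}
    (h : ∀ j, j < D → pvEntry g j i = pvEntry g' j i) :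
    pvReadCol g i D = pvReadCol g' i D := by
  unfold pvReadCol
  apply List.map_congr_left
  intro j hj
  exact h j (List.mem_range.mp hj)

theorem pvReadCol_setCell_ne {g : List (List Int)} {j i' i D : Nat} {v : Int} (h : i' ≠ i) :
    pvReadCol (pvSetCell g j i' v) i D = pvReadCol g i D := by
  apply pvReadCol_congr
  intro j' _
  rw [pvEntry_setCell]
  split_ifs with hc
  · omega
  · rfl

theorem pvReadCol_setCell_self {g : List (List Int)} {j i D : Nat} {v : Int}
    (hjD : j < D) (hjg : j < g.length) (hi : i < (g.getD j []).length) :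
    pvReadCol (pvSetCell g j i v) i D = (pvReadCol g i D).set j v := by
  apply List.ext_getElem
  · simp [pvReadCol]
  · intro k hk hk'
    simp only [pvReadCol, List.getElem_map, List.getElem_range, List.getElem_set,
      List.length_map, List.length_range] at *
    rw [pvEntry_setCell]
    split_ifs with h1 h2 <;> first | rfl | omega

-- the settle pass, recursively (B's per-column loop in functional form)
def pvGo : List Int → Nat → List Int
  | [], z => List.replicate z 0
  | v :: t, z =>
    if v = 1 then 1 :: pvGo t z
    else if v = 0 then pvGo t (z + 1)
    else List.replicate z 0 ++ v :: pvGo t 0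

theorem pvFoldSettle (l : List Int) : ∀ (acc : List Int) (z : Nat),
    (l.foldl pvSettleStep (acc, z)).1 ++ List.replicate (l.foldl pvSettleStep (acc, z)).2 0
      = acc ++ pvGo l z := by
  induction l with
  | nil => intro acc z; simp [pvGo]
  | cons v t ih =>
    intro acc z
    by_cases h1 : v = 1
    · subst h1
      simp only [List.foldl_cons, pvSettleStep, if_pos rfl, pvGo, ite_true, eq_self_iff_true]
      rw [ih (acc ++ [1]) z]
      simp
    · by_cases h0 : v = 0
      · subst h0
        simp only [List.foldl_cons, pvSettleStep, pvGo, if_neg h1, if_pos rfl, ite_true,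
          eq_self_iff_true]
        exact ih acc (z + 1)
      · simp only [List.foldl_cons, pvSettleStep, pvGo, if_neg h1, if_neg h0]
        rw [ih (acc ++ List.replicate z 0 ++ [v]) 0]
        simp

theorem pvSettleCol_eq (c : List Int) : pvSettleCol c = pvGo c 0 := by
  have := pvFoldSettle c [] 0
  simpa [pvSettleCol] using this

theorem pvGo_swap : ∀ (c : List Int) (k z : Nat), k + 1 < c.length →
    c.getD k 0 = 0 → c.getD (k + 1) 0 = 1 →
    pvGo ((c.set k 1).set (k + 1) 0) z = pvGo c z := by
  intro c
  induction c with
  | nil => intro k z h; simp at h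
  | cons a t ih =>
    intro k z hlen h0 h1
    cases k with
    | zero =>
      match t, hlen with
      | b :: t', _ =>
        simp only [List.getD_cons_zero] at h0
        simp only [List.getD_cons_succ, List.getD_cons_zero] at h1
        subst h0; subst h1
        simp [pvGo]
    | succ k' =>
      have hset : (((a :: t).set (k' + 1) 1).set (k' + 1 + 1) 0)
          = a :: ((t.set k' 1).set (k' + 1) 0) := by simp
      rw [hset]
      simp only [List.getD_cons_succ] at h0 h1
      have hlt : k' + 1 < t.length := by simpa using hlen
      by_cases ha1 : a = 1
      · simp [pvGo, ha1, ih k' z hlt h0 h1]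
      · by_cases ha0 : a = 0
        · simp [pvGo, ha1, ha0, ih k' (z + 1) hlt h0 h1]
        · simp [pvGo, ha1, ha0, ih k' 0 hlt h0 h1]

theorem pvGo_fix : ∀ (l : List Int) (z : Nat),
    (∀ k, k + 1 < l.length → ¬(l.getD k 0 = 0 ∧ l.getD (k + 1) 0 = 1)) →
    (z = 0 ∨ l.getD 0 0 ≠ 1) →
    pvGo l z = List.replicate z 0 ++ l := by
  intro l
  induction l with
  | nil => intro z _ _; simp [pvGo]
  | cons v t ih =>
    intro z hAdj hz
    have hAdjT : ∀ k, k + 1 < t.length → ¬(t.getD k 0 = 0 ∧ t.getD (k + 1) 0 = 1) := by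
      intro k hk
      have := hAdj (k + 1) (by simpa using Nat.succ_lt_succ hk)
      simpa using this
    by_cases h1 : v = 1
    · subst h1
      have hz0 : z = 0 := by
        rcases hz with hz | hz
        · exact hz
        · simp at hz
      subst hz0
      have := ih 0 hAdjT (Or.inl rfl)
      simp [pvGo, this]
    · by_cases h0 : v = 0
      · subst h0
        have hzT : (z + 1 = 0) ∨ t.getD 0 0 ≠ 1 := by
          right
          intro ht1
          cases t with
          | nil => simp at ht1
          | cons b t' =>
            exact hAdj 0 (by simp) ⟨by simp, by simpa using ht1⟩
        rw [pvGo, if_neg (by norm_num), if_pos rfl, ih (z + 1) hAdjT hzT]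
        simp [List.replicate_succ']
      · rw [pvGo, if_neg h1, if_neg h0, ih 0 hAdjT (Or.inl rfl)]
        simp

-- grid-level invariants
def pvInv (W : Nat) (g : List (List Int)) : Prop :=
  ∀ j, j < g.length → W ≤ (g.getD j []).length

def pvAltB (W D : Nat) (g : List (List Int)) : List (List Int) :=
  (List.range W).foldl (pvColMap D) g

def pvSettled (W D : Nat) (g : List (List Int)) : Prop :=
  ∀ i, i < W → ∀ j, 1 ≤ j → j < D → ¬(pvEntry g j i = 1 ∧ pvEntry g (j - 1) i = 0)

def pvSwap (g : List (List Int)) (j i : Nat) : List (List Int) :=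
  pvSetCell (pvSetCell g (j - 1) i 1) j i 0

theorem pvSwap_length (g : List (List Int)) (j i : Nat) :
    (pvSwap g j i).length = g.length := by simp [pvSwap, pvSetCell_length]

theorem pvSwap_rowlen (g : List (List Int)) (j i j' : Nat) :
    ((pvSwap g j i).getD j' []).length = (g.getD j' []).length := by
  unfold pvSwap
  rw [pvSetCell_rowlen, pvSetCell_rowlen]

theorem pvColMap_length (D : Nat) (g : List (List Int)) (i : Nat) :
    (pvColMap D g i).length = g.length := by simp [pvColMap, pvWriteCol_length]

theorem pvColMap_rowlen (D : Nat) (g : List (List Int)) (i j' : Nat) :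
    ((pvColMap D g i).getD j' []).length = (g.getD j' []).length := by
  unfold pvColMap
  rw [pvWriteCol_rowlen]

theorem pvInv_of_shape {W : Nat} {g g' : List (List Int)} (h1 : g'.length = g.length)
    (h2 : ∀ j, (g'.getD j []).length = (g.getD j []).length) (hI : pvInv W g) : pvInv W g' := by
  intro j hj
  rw [h2 j]
  exact hI j (h1 ▸ hj)

theorem pvEntry_colMap_ne {D : Nat} {g : List (List Int)} {i j i' : Nat} (h : i' ≠ i) :
    pvEntry (pvColMap D g i) j i' = pvEntry g j i' := by
  rw [pvColMap, pvEntry_writeCol]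
  split_ifs with hc
  · omega
  · rfl

-- the settled column at i0 absorbs a swap (the i = i0 case)
theorem pvColMap_swap_self {W D i0 j0 : Nat} {g : List (List Int)}
    (hInv : pvInv W g) (hlen : g.length = D) (hi0 : i0 < W)
    (hj : 1 ≤ j0) (hjD : j0 < D)
    (h1 : pvEntry g j0 i0 = 1) (h0 : pvEntry g (j0 - 1) i0 = 0) :
    pvColMap D (pvSwap g j0 i0) i0 = pvColMap D g i0 := by
  have hi0row : ∀ j', j' < g.length → i0 < (g.getD j' []).length :=
    fun j' hj' => lt_of_lt_of_le hi0 (hInv j' hj')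
  have hj0g : j0 < g.length := by omega
  have hj1g : j0 - 1 < g.length := by omega
  have hcol : pvReadCol (pvSwap g j0 i0) i0 D
      = ((pvReadCol g i0 D).set (j0 - 1) 1).set j0 0 := by
    unfold pvSwap
    rw [pvReadCol_setCell_self hjD (by rw [pvSetCell_length]; exact hj0g)
        (by rw [pvSetCell_rowlen]; exact hi0row _ hj0g),
      pvReadCol_setCell_self (by omega) hj1g (hi0row _ hj1g)]
  have hsettle : pvSettleCol (pvReadCol (pvSwap g j0 i0) i0 D)
      = pvSettleCol (pvReadCol g i0 D) := by
    rw [hcol, pvSettleCol_eq, pvSettleCol_eq]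
    have hj01 : j0 - 1 + 1 = j0 := by omega
    have := pvGo_swap (pvReadCol g i0 D) (j0 - 1) 0
      (by rw [pvReadCol_length]; omega)
      (by rw [pvReadCol_getD (by omega)]; exact h0)
      (by rw [hj01, pvReadCol_getD hjD]; exact h1)
    rw [hj01] at this
    exact this
  unfold pvColMap
  rw [hsettle]
  apply pvGrid_eq
  · rw [pvWriteCol_length, pvWriteCol_length, pvSwap_length]
  · intro j'; rw [pvWriteCol_rowlen, pvWriteCol_rowlen, pvSwap_rowlen]
  · intro j i'
    rw [pvEntry_writeCol, pvEntry_writeCol]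
    simp only [pvSwap_length, pvSwap_rowlen]
    split_ifs with h
    · rfl
    · unfold pvSwap
      rw [pvEntry_setCell]
      simp only [pvSetCell_length, pvSetCell_rowlen]
      split_ifs with hA
      · exfalso
        obtain ⟨hja, hia, hjb, hib⟩ := hA
        subst hja; subst hia
        exact h ⟨rfl, hjD, hjb, hib⟩
      · rw [pvEntry_setCell]
        split_ifs with hB
        · exfalso
          obtain ⟨hja, hia, hjb, hib⟩ := hB
          subst hja; subst hia
          exact h ⟨rfl, by omega, hjb, hib⟩
        · rfl

theorem pvWriteCol_setCell_comm {g : List (List Int)} {i i0 j : Nat} {c : List Int} {v : Int}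
    {D : Nat} (h : i ≠ i0) :
    pvWriteCol (pvSetCell g j i0 v) i c D = pvSetCell (pvWriteCol g i c D) j i0 v := by
  induction D with
  | zero => rw [pvWriteCol_zero, pvWriteCol_zero]
  | succ D ih => rw [pvWriteCol_succ, pvWriteCol_succ, ih, pvSetCell_comm (by omega)]

theorem pvColMap_setCell_comm {D : Nat} {g : List (List Int)} {i i0 j : Nat} {v : Int}
    (h : i ≠ i0) :
    pvColMap D (pvSetCell g j i0 v) i = pvSetCell (pvColMap D g i) j i0 v := by
  unfold pvColMap
  rw [pvReadCol_setCell_ne (by omega), pvWriteCol_setCell_comm h]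

theorem pvAltFold_swap {W D i0 j0 : Nat} : ∀ (L : List Nat) (g : List (List Int)),
    pvInv W g → g.length = D → (∀ x ∈ L, x < W) → i0 ∈ L →
    1 ≤ j0 → j0 < D → pvEntry g j0 i0 = 1 → pvEntry g (j0 - 1) i0 = 0 →
    L.foldl (pvColMap D) (pvSwap g j0 i0) = L.foldl (pvColMap D) g := by
  intro L
  induction L with
  | nil => intro g _ _ _ hmem; simp at hmem
  | cons i T ih =>
    intro g hInv hlen hW hmem hj hjD h1 h0
    by_cases hii : i = i0
    · subst hii
      simp only [List.foldl_cons]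
      rw [pvColMap_swap_self hInv hlen (hW i List.mem_cons_self) hj hjD h1 h0]
    · simp only [List.foldl_cons]
      have hswap : pvColMap D (pvSwap g j0 i0) i = pvSwap (pvColMap D g i) j0 i0 := by
        unfold pvSwap
        rw [pvColMap_setCell_comm hii, pvColMap_setCell_comm hii]
      rw [hswap]
      apply ih
      · exact pvInv_of_shape (pvColMap_length D g i) (pvColMap_rowlen D g i) hInv
      · rw [pvColMap_length]; exact hlen
      · intro x hx; exact hW x (List.mem_cons_of_mem _ hx)
      · rcases List.mem_cons.mp hmem with h | h
        · exact absurd h.symm hii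
        · exact h
      · exact hj
      · exact hjD
      · rw [pvEntry_colMap_ne (Ne.symm hii)]; exact h1
      · rw [pvEntry_colMap_ne (Ne.symm hii)]; exact h0

theorem pvAltB_swap {W D i0 j0 : Nat} {g : List (List Int)}
    (hInv : pvInv W g) (hlen : g.length = D) (hi0 : i0 < W)
    (hj : 1 ≤ j0) (hjD : j0 < D)
    (h1 : pvEntry g j0 i0 = 1) (h0 : pvEntry g (j0 - 1) i0 = 0) :
    pvAltB W D (pvSwap g j0 i0) = pvAltB W D g := by
  apply pvAltFold_swap _ g hInv hlen (fun x hx => List.mem_range.mp hx)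
    (List.mem_range.mpr hi0) hj hjD h1 h0

-- a pass never turns `changed` off, and preserves everything we track
theorem pvFold_true {i : Nat} : ∀ (L : List Nat) (st : List (List Int) × Bool),
    st.2 = true → (L.foldl (pvStepA i) st).2 = true := by
  intro L
  induction L with
  | nil => intro st h; exact h
  | cons j T ih =>
    intro st h
    apply ih
    unfold pvStepA
    split_ifs <;> simpa

theorem pvInnerFold {W D i : Nat} (hiW : i < W) : ∀ (L : List Nat) (st : List (List Int) × Bool),
    (∀ j ∈ L, 1 ≤ j ∧ j < D) → pvInv W st.1 → st.1.length = D →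
    pvInv W (L.foldl (pvStepA i) st).1 ∧ (L.foldl (pvStepA i) st).1.length = D ∧
    pvAltB W D (L.foldl (pvStepA i) st).1 = pvAltB W D st.1 ∧
    ((L.foldl (pvStepA i) st).2 = false → (L.foldl (pvStepA i) st).1 = st.1 ∧ st.2 = false ∧
      ∀ j ∈ L, ¬(pvEntry st.1 j i = 1 ∧ pvEntry st.1 (j - 1) i = 0)) := by
  intro L
  induction L with
  | nil =>
    intro st _ hInv hlen
    exact ⟨hInv, hlen, rfl, fun h => ⟨rfl, h, by simp⟩⟩
  | cons j T ih =>
    intro st hL hInv hlen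
    have hjD := hL j List.mem_cons_self
    by_cases hcond : pvEntry st.1 j i = 1 ∧ pvEntry st.1 (j - 1) i = 0
    · have hstep : pvStepA i st j = (pvSwap st.1 j i, true) := by
        simp [pvStepA, pvSwap, hcond]
      have hInv' : pvInv W (pvSwap st.1 j i) :=
        pvInv_of_shape (pvSwap_length _ _ _) (pvSwap_rowlen _ _ _) hInv
      have hlen' : (pvSwap st.1 j i).length = D := by rw [pvSwap_length]; exact hlen
      have h4 := ih (pvSwap st.1 j i, true)
        (fun x hx => hL x (List.mem_cons_of_mem _ hx)) hInv' hlen'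
      simp only [List.foldl_cons, hstep]
      refine ⟨h4.1, h4.2.1, ?_, ?_⟩
      · rw [h4.2.2.1]
        exact pvAltB_swap hInv hlen hiW hjD.1 hjD.2 hcond.1 hcond.2
      · intro hfalse
        have := pvFold_true (i := i) T (pvSwap st.1 j i, true) rfl
        rw [hfalse] at this
        exact absurd this (by simp)
    · have hstep : pvStepA i st j = st := by
        simp only [pvStepA, if_neg hcond]
      have h4 := ih st (fun x hx => hL x (List.mem_cons_of_mem _ hx)) hInv hlen
      simp only [List.foldl_cons, hstep]
      refine ⟨h4.1, h4.2.1, h4.2.2.1, ?_⟩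
      intro hfalse
      obtain ⟨he, hb, hall⟩ := h4.2.2.2 hfalse
      refine ⟨he, hb, ?_⟩
      intro x hx
      rcases List.mem_cons.mp hx with h | h
      · subst h; exact hcond
      · exact hall x h

theorem pvOuterFold {W D : Nat} : ∀ (L : List Nat) (st : List (List Int) × Bool),
    (∀ x ∈ L, x < W) → pvInv W st.1 → st.1.length = D →
    pvInv W (L.foldl (fun st i => (List.range' 1 (D - 1)).foldl (pvStepA i) st) st).1 ∧
    (L.foldl (fun st i => (List.range' 1 (D - 1)).foldl (pvStepA i) st) st).1.length = D ∧
    pvAltB W D (L.foldl (fun st i => (List.range' 1 (D - 1)).foldl (pvStepA i) st) st).1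
      = pvAltB W D st.1 ∧
    ((L.foldl (fun st i => (List.range' 1 (D - 1)).foldl (pvStepA i) st) st).2 = false →
      (L.foldl (fun st i => (List.range' 1 (D - 1)).foldl (pvStepA i) st) st).1 = st.1 ∧
      st.2 = false ∧
      ∀ i ∈ L, ∀ j, 1 ≤ j → j < D →
        ¬(pvEntry st.1 j i = 1 ∧ pvEntry st.1 (j - 1) i = 0)) := by
  intro L
  induction L with
  | nil =>
    intro st _ hInv hlen
    exact ⟨hInv, hlen, rfl, fun h => ⟨rfl, h, by simp⟩⟩
  | cons i T ih =>
    intro st hW hInv hlen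
    have hiW := hW i List.mem_cons_self
    have hrng : ∀ j ∈ List.range' 1 (D - 1), 1 ≤ j ∧ j < D := by
      intro j hj
      have := List.mem_range'_1.mp hj
      omega
    have hinner := pvInnerFold hiW (List.range' 1 (D - 1)) st hrng hInv hlen
    have houter := ih ((List.range' 1 (D - 1)).foldl (pvStepA i) st)
      (fun x hx => hW x (List.mem_cons_of_mem _ hx)) hinner.1 hinner.2.1
    simp only [List.foldl_cons]
    refine ⟨houter.1, houter.2.1, by rw [houter.2.2.1, hinner.2.2.1], ?_⟩
    intro hfalse
    obtain ⟨he1, hb1, hall1⟩ := houter.2.2.2 hfalse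
    rw [he1] at *
    obtain ⟨he2, hb2, hall2⟩ := hinner.2.2.2 hb1
    refine ⟨he2, hb2, ?_⟩
    intro x hx j h1j hjD
    rcases List.mem_cons.mp hx with h | h
    · subst h
      exact hall2 j (List.mem_range'_1.mpr (by omega))
    · have := hall1 x h j h1j hjD
      rwa [he2] at this

theorem pvPass {W D : Nat} (g : List (List Int)) (hInv : pvInv W g) (hlen : g.length = D) :
    pvInv W (pvPassA W D g).1 ∧ (pvPassA W D g).1.length = D ∧
    pvAltB W D (pvPassA W D g).1 = pvAltB W D g ∧
    ((pvPassA W D g).2 = false → (pvPassA W D g).1 = g ∧ pvSettled W D g) := by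
  have := pvOuterFold (List.range W) (g, false) (fun x hx => List.mem_range.mp hx) hInv hlen
  refine ⟨this.1, this.2.1, this.2.2.1, fun hfalse => ?_⟩
  obtain ⟨he, _, hall⟩ := this.2.2.2 hfalse
  exact ⟨he, fun i hi j h1j hjD => hall i (List.mem_range.mpr hi) j h1j hjD⟩

-- a settled grid is a fixed point of B's column pass
theorem pvColMap_settled {D i : Nat} {g : List (List Int)}
    (hset : ∀ j, 1 ≤ j → j < D → ¬(pvEntry g j i = 1 ∧ pvEntry g (j - 1) i = 0)) :
    pvColMap D g i = g := by
  have hcol : pvSettleCol (pvReadCol g i D) = pvReadCol g i D := by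
    rw [pvSettleCol_eq]
    have hadj : ∀ k, k + 1 < (pvReadCol g i D).length →
        ¬((pvReadCol g i D).getD k 0 = 0 ∧ (pvReadCol g i D).getD (k + 1) 0 = 1) := by
      intro k hk
      rw [pvReadCol_length] at hk
      rw [pvReadCol_getD (by omega), pvReadCol_getD (by omega)]
      rintro ⟨ha, hb⟩
      exact hset (k + 1) (by omega) (by omega) ⟨hb, by simpa using ha⟩
    have := pvGo_fix (pvReadCol g i D) 0 hadj (Or.inl rfl)
    simpa using this
  unfold pvColMap
  rw [hcol]
  apply pvGrid_eq
  · rw [pvWriteCol_length]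
  · intro j'; rw [pvWriteCol_rowlen]
  · intro j i'
    rw [pvEntry_writeCol]
    split_ifs with h
    · obtain ⟨hi', hjD, _, _⟩ := h
      rw [pvReadCol_getD hjD, hi']
    · rfl

theorem pvFoldl_fix {D : Nat} {g : List (List Int)} : ∀ (L : List Nat),
    (∀ i ∈ L, pvColMap D g i = g) → L.foldl (pvColMap D) g = g := by
  intro L
  induction L with
  | nil => intro _; rfl
  | cons i T ih =>
    intro h
    simp only [List.foldl_cons, h i List.mem_cons_self]
    exact ih (fun x hx => h x (List.mem_cons_of_mem _ hx))

theorem pvAltB_settled {W D : Nat} {g : List (List Int)} (hsettled : pvSettled W D g) :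
    pvAltB W D g = g := by
  apply pvFoldl_fix
  intro i hi
  exact pvColMap_settled (hsettled i (List.mem_range.mp hi))

theorem pvLoop_alt {W D : Nat} : ∀ (n : Nat) (g : List (List Int)),
    pvPot g 0 < n → pvInv W g → g.length = D → pvLoopA n W D g = pvAltB W D g := by
  intro n
  induction n with
  | zero => intro g hpot _ _; omega
  | succ n ih =>
    intro g hpot hInv hlen
    rw [pvLoopA]
    by_cases hch : (pvPassA W D g).2 = true
    · rw [if_pos hch]
      obtain ⟨hInv', hlen', halt, _⟩ := pvPass g hInv hlen
      have hlt := pvPassA_pot W D g hch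
      rw [ih (pvPassA W D g).1 (by omega) hInv' hlen', halt]
    · rw [if_neg hch]
      obtain ⟨_, _, _, hfix⟩ := pvPass g hInv hlen
      obtain ⟨he, hs⟩ := hfix (Bool.eq_false_iff.mpr hch)
      rw [he, pvAltB_settled hs]

-- ===== VERDICT (by name: the statement is the Claim_ definition above) =====
theorem process0_spec : Claim_equal_process0 := by
  intro ret _ hPre
  unfold Spec_process0
  obtain ⟨hne, hrows⟩ := hPre
  have hInv : pvInv (ret.headD []).length ret := by
    intro j hj
    rw [List.getD_eq_getElem _ _ hj]
    exact hrows _ (List.getElem_mem hj)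
  exact pvLoop_alt (pvPot ret 0 + 1) ret (by omega) hInv rfl
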